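-- pv_equiv track=rewrite | github.com/NaderCh21/IDPA-P1 | mypython/preprocessing.py | create_term_context_matrix
-- ===== SOURCE A (Python) =====
-- def create_term_context_matrix(tokens, context_window=2):
--     # Build the term-context matrix
--     term_context_matrix = {}
--
--     # Loop over every token/word
--     for doc_tokens in tokens:
--         for i, target_word in enumerate(doc_tokens):
--             term_context_matrix.setdefault(target_word, {})
--             for j in range(max(0, i - context_window), min(i + context_window + 1, len(doc_tokens))):
--                 if i != j:
--                     context_word = doc_tokens[j]
--                     term_context_matrix[target_word][context_word] = term_context_matrix[target_word].get(context_word, 0) + 1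
--
--     return term_context_matrix
-- ===== SOURCE B (Python) =====
-- def _count(xs):
--     d = {}
--     for x in xs:
--         d[x] = d.get(x, 0) + 1
--     return d
--
--
-- def create_term_context_matrix(tokens, context_window=2):
--     # Gather, per word (in first-occurrence order), the stream of all its
--     # in-window context words via slices; then frequency-count each stream.
--     streams = {}
--     for doc in tokens:
--         for i, w in enumerate(doc):
--             left = doc[max(0, i - context_window):i]
--             right = doc[i + 1:max(i + 1, i + context_window + 1)]
--             streams[w] = streams.get(w, []) + left + right
--     return {w: _count(cs) for w, cs in streams.items()}
-- ===== Notes on version B (the rewrite author's own statement) =====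
-- stated objective: alternative
-- what changed: Replaces A's per-center index-range window scan with in-place nested-dict counting by a two-phase gather-then-count: slices collect each word's entire context stream into a per-word list, then a separate frequency-counting pass builds each row.
import Mathlib
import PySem

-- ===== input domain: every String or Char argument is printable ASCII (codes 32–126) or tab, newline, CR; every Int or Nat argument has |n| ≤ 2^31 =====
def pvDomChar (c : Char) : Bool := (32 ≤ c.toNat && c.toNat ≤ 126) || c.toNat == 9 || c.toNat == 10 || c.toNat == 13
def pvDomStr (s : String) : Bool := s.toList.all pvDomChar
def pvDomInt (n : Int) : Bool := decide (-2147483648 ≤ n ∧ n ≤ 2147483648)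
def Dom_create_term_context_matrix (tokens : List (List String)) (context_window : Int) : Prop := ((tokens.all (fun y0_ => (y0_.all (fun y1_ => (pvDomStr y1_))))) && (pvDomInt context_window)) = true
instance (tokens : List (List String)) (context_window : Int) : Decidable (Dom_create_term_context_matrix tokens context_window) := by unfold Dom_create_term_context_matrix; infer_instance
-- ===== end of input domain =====

-- B replaces A's per-center window index scan with in-place nested counting by a slice-based
-- gather of each word's context stream plus a separate frequency-counting pass (alternative
-- decomposition, same cost).

-- ===== PORT A =====
-- literal port of A: nested dict of counts, updated in place inside the window scan
def create_term_context_matrix (tokens : List (List String)) (context_window : Int) : List (String × List (String × Int)) :=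
  let m : PySem.Dict String (PySem.Dict String Int) :=
    tokens.foldl (fun m doc_tokens =>
      (PySem.List.enumerate doc_tokens).foldl (fun m p =>
        let i := p.1
        let target_word := p.2
        let m := m.setdefault target_word PySem.Dict.empty
        (PySem.List.pyRange (max 0 (i - context_window)) (min (i + context_window + 1) ((doc_tokens.length : Int))) 1).foldl
          (fun m j =>
            if i ≠ j then
              -- doc_tokens[j]: j is always in range here, so the default is never used
              let context_word := PySem.List.pyGetD doc_tokens j ""
              m.modify target_word PySem.Dict.empty
                (fun row => row.insert context_word (row.getD context_word 0 + 1))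
            else m) m) m)
      PySem.Dict.empty
  m.items.map (fun p => (p.1, p.2.items))

-- ===== PORT B =====
-- helper of Source B: _count
def pvCount (xs : List String) : PySem.Dict String Int :=
  xs.foldl (fun d x => d.insert x (d.getD x 0 + 1)) PySem.Dict.empty

def create_term_context_matrix_alt (tokens : List (List String)) (context_window : Int) : List (String × List (String × Int)) :=
  let streams : PySem.Dict String (List String) :=
    tokens.foldl (fun s doc =>
      (PySem.List.enumerate doc).foldl (fun s p =>
        let i := p.1
        let w := p.2
        let left := PySem.List.slice doc (some (max 0 (i - context_window))) (some i)
        let right := PySem.List.slice doc (some (i + 1)) (some (max (i + 1) (i + context_window + 1)))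
        s.insert w (s.getD w [] ++ left ++ right)) s)
      PySem.Dict.empty
  streams.items.map (fun p => (p.1, (pvCount p.2).items))

-- ===== PRECONDITION & SPEC =====
def Spec_create_term_context_matrix (tokens : List (List String)) (context_window : Int) (out : List (String × List (String × Int))) : Prop := out = create_term_context_matrix_alt tokens context_window
instance (tokens : List (List String)) (context_window : Int) (out : List (String × List (String × Int))) : Decidable (Spec_create_term_context_matrix tokens context_window out) := by unfold Spec_create_term_context_matrix; infer_instance

-- ===== CLAIM (what is proved, stated in full; the proofs are below) =====
def Claim_equal_create_term_context_matrix : Prop := ∀ (tokens : List (List String)) (context_window : Int), Dom_create_term_context_matrix tokens context_window → Spec_create_term_context_matrix tokens context_window (create_term_context_matrix tokens context_window)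

-- ===== LEMMAS AND PROOFS =====

-- map pvCount over the values of a streams dict
def pvMapC (s : PySem.Dict String (List String)) : PySem.Dict String (PySem.Dict String Int) :=
  PySem.Dict.mk (s.items.map (fun p => (p.1, pvCount p.2)))

theorem pvMapC_contains (s : PySem.Dict String (List String)) (k : String) :
    (pvMapC s).contains k = s.contains k := by
  simp [pvMapC, PySem.Dict.contains, List.any_map, Function.comp_def]

theorem pvMapC_get? (s : PySem.Dict String (List String)) (k : String) :
    (pvMapC s).get? k = (s.get? k).map pvCount := by
  simp [pvMapC, PySem.Dict.get?, List.find?_map, Function.comp_def, Option.map_map]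

theorem pvMapC_getD (s : PySem.Dict String (List String)) (k : String) :
    (pvMapC s).getD k PySem.Dict.empty = pvCount (s.getD k []) := by
  simp only [PySem.Dict.getD, pvMapC_get?]
  cases s.get? k <;> rfl

theorem pvMapC_insert (s : PySem.Dict String (List String)) (k : String) (v : List String) :
    pvMapC (s.insert k v) = (pvMapC s).insert k (pvCount v) := by
  apply PySem.Dict.ext
  by_cases hc : s.contains k = true
  · rw [show (pvMapC (s.insert k v)).items = (s.insert k v).items.map (fun p => (p.1, pvCount p.2)) from rfl,
        PySem.Dict.items_insert_of_contains _ _ hc,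
        PySem.Dict.items_insert_of_contains _ _ (by rw [pvMapC_contains]; exact hc),
        show (pvMapC s).items = s.items.map (fun p => (p.1, pvCount p.2)) from rfl,
        List.map_map, List.map_map]
    apply List.map_congr_left
    intro p _
    by_cases h : p.1 = k
    · simp [h]
    · simp [h]
  · rw [show (pvMapC (s.insert k v)).items = (s.insert k v).items.map (fun p => (p.1, pvCount p.2)) from rfl,
        PySem.Dict.items_insert_of_not_contains _ _ (by simpa using hc),
        PySem.Dict.items_insert_of_not_contains _ _ (by rw [pvMapC_contains]; simpa using hc)]
    simp [pvMapC]

theorem pvCount_append_one (xs : List String) (c : String) :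
    pvCount (xs ++ [c]) = (pvCount xs).insert c ((pvCount xs).getD c 0 + 1) := by
  simp [pvCount, List.foldl_append]

theorem pv_not_contains_forall {ν : Type} (s : PySem.Dict String ν) (k : String)
    (hc : s.contains k = false) : ∀ p ∈ s.items, (p.1 == k) = false := by
  have := hc
  simp only [PySem.Dict.contains, List.any_eq_false] at this
  intro p hp
  simpa using this p hp

theorem pv_list_replace_self (k : String) (v : List String) :
    ∀ (l : List (String × List String)), (l.map Prod.fst).Nodup →
    l.find? (fun p => p.1 == k) = some (k, v) →
    l.map (fun p => if (p.1 == k) = true then (k, v) else p) = l := by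
  intro l
  induction l with
  | nil => intro _ h; cases h
  | cons a t ih =>
    intro hnd hf
    by_cases h : (a.1 == k) = true
    · simp only [List.find?_cons, h] at hf
      have hak : a.1 = k := by simpa using h
      have hav : a = (k, v) := by
        injection hf with hf'
      simp only [List.map_cons, h, if_true]
      rw [hav]
      congr 1
      have hnotin : ∀ p ∈ t, (p.1 == k) = false := by
        intro p hp
        have hmem : a.1 ∉ t.map Prod.fst := by
          simp only [List.map_cons, List.nodup_cons] at hnd
          exact hnd.1
        simp only [beq_eq_false_iff_ne, ne_eq]
        intro hpk
        exact hmem (by rw [hak, ← hpk]; exact List.mem_map_of_mem hp)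
      calc t.map (fun p => if (p.1 == k) = true then (k, v) else p)
          = t.map id := List.map_congr_left (by intro p hp; simp [hnotin p hp])
        _ = t := List.map_id t
    · have hb : (a.1 == k) = false := by simpa using h
      simp only [List.find?_cons, hb] at hf
      simp only [List.map_cons, if_neg h]
      rw [ih (by simp only [List.map_cons, List.nodup_cons] at hnd; exact hnd.2) hf]

-- inserting a key's current value back is the identity (unique keys)
theorem pv_insert_getD_self (s : PySem.Dict String (List String))
    (hnd : s.keys.Nodup) (k : String) (hc : s.contains k = true) :
    s.insert k (s.getD k []) = s := by
  apply PySem.Dict.ext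
  rw [PySem.Dict.items_insert_of_contains _ _ hc]
  cases hf : s.items.find? (fun p => p.1 == k) with
  | none =>
    exfalso
    rw [List.find?_eq_none] at hf
    have hany : (s.items.any fun p => p.1 == k) = true := hc
    rw [List.any_eq_true] at hany
    obtain ⟨x, hx, hpx⟩ := hany
    exact hf x hx hpx
  | some p =>
    have hpk : p.1 = k := by simpa using List.find?_some hf
    have hgd : s.getD k [] = p.2 := by
      simp [PySem.Dict.getD, PySem.Dict.get?, hf]
    rw [hgd]
    have hkp : ((k, p.2) : String × List String) = p := Prod.ext hpk.symm rfl
    exact pv_list_replace_self k p.2 s.items hnd (by rw [hf, ← hkp])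

theorem pv_setdefault_append {ν : Type} (s : PySem.Dict String ν) (k : String) (v : ν)
    (hc : s.contains k = false) : s.setdefault k v = PySem.Dict.mk (s.items ++ [(k, v)]) := by
  simp [PySem.Dict.setdefault, hc]

theorem pvMapC_setdefault (s : PySem.Dict String (List String)) (k : String) :
    (pvMapC s).setdefault k PySem.Dict.empty = pvMapC (s.setdefault k []) := by
  by_cases hc : s.contains k = true
  · rw [PySem.Dict.setdefault_of_contains _ _ (by rw [pvMapC_contains]; exact hc),
        PySem.Dict.setdefault_of_contains _ _ hc]
  · have hc' : s.contains k = false := by simpa using hc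
    rw [pv_setdefault_append _ _ _ (by rw [pvMapC_contains]; exact hc'),
        pv_setdefault_append _ _ _ hc']
    apply PySem.Dict.ext
    simp [pvMapC, pvCount]

theorem pv_contains_setdefault (s : PySem.Dict String (List String)) (k : String) :
    (s.setdefault k []).contains k = true := by
  by_cases hc : s.contains k = true
  · rw [PySem.Dict.setdefault_of_contains _ _ hc]; exact hc
  · have hc' : s.contains k = false := by simpa using hc
    rw [pv_setdefault_append _ _ _ hc']
    simp [PySem.Dict.contains, List.any_append]

theorem pv_nodup_setdefault (s : PySem.Dict String (List String)) (k : String)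
    (hnd : s.keys.Nodup) : (s.setdefault k []).keys.Nodup := by
  by_cases hc : s.contains k = true
  · rw [PySem.Dict.setdefault_of_contains _ _ hc]; exact hnd
  · have hc' : s.contains k = false := by simpa using hc
    rw [pv_setdefault_append _ _ _ hc']
    have hmem : k ∉ s.keys := fun hk => by
      simp [(PySem.Dict.contains_iff_mem_keys s k).mpr hk] at hc'
    show ((PySem.Dict.mk (s.items ++ [(k, ([] : List String))])).keys).Nodup
    simp only [PySem.Dict.keys, List.map_append, List.map_cons, List.map_nil]
    rw [List.nodup_append]
    refine ⟨hnd, List.nodup_singleton _, ?_⟩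
    intro a ha b hb
    have hbk : b = k := by simpa using hb
    subst hbk
    intro hak
    subst hak
    exact hmem ha

theorem pv_getD_setdefault (s : PySem.Dict String (List String)) (k : String) :
    (s.setdefault k []).getD k [] = s.getD k [] := by
  by_cases hc : s.contains k = true
  · rw [PySem.Dict.setdefault_of_contains _ _ hc]
  · have hc' : s.contains k = false := by simpa using hc
    have hall := pv_not_contains_forall s k hc'
    rw [pv_setdefault_append _ _ _ hc', PySem.Dict.getD_of_not_contains _ _ hc']
    simp only [PySem.Dict.getD, PySem.Dict.get?]
    rw [List.find?_append, List.find?_eq_none.mpr (fun p hp => by simp [hall p hp])]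
    simp

theorem pv_insert_setdefault (s : PySem.Dict String (List String)) (k : String) (v : List String) :
    (s.setdefault k []).insert k v = s.insert k v := by
  by_cases hc : s.contains k = true
  · rw [PySem.Dict.setdefault_of_contains _ _ hc]
  · have hc' : s.contains k = false := by simpa using hc
    have hall := pv_not_contains_forall s k hc'
    rw [pv_setdefault_append _ _ _ hc']
    apply PySem.Dict.ext
    rw [PySem.Dict.items_insert_of_contains _ _ (show (PySem.Dict.mk (s.items ++ [(k, ([] : List String))])).contains k = true by
          simp [PySem.Dict.contains, List.any_append]),
        PySem.Dict.items_insert_of_not_contains _ _ hc']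
    rw [show (PySem.Dict.mk (s.items ++ [(k, ([] : List String))])).items
          = s.items ++ [(k, ([] : List String))] from rfl]
    rw [List.map_append]
    congr 1
    · calc s.items.map (fun p => if (p.1 == k) = true then (k, v) else p)
          = s.items.map id := List.map_congr_left (by intro p hp; simp [hall p hp])
        _ = s.items := List.map_id _
    · simp

-- counting loop at one key, starting from a gathered state (w present in s)
theorem pv_stepC' (w : String) (ctx : List String) :
    ∀ (s : PySem.Dict String (List String)), s.keys.Nodup → s.contains w = true →
    ctx.foldl (fun m c => m.modify w PySem.Dict.empty
        (fun row => row.insert c (row.getD c 0 + 1))) (pvMapC s)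
      = pvMapC (s.insert w (s.getD w [] ++ ctx)) := by
  induction ctx with
  | nil =>
    intro s hnd hc
    simp only [List.foldl_nil, List.append_nil]
    rw [pv_insert_getD_self s hnd w hc]
  | cons c rest ih =>
    intro s hnd hc
    simp only [List.foldl_cons]
    have hstep : (pvMapC s).modify w PySem.Dict.empty
        (fun row => row.insert c (row.getD c 0 + 1))
        = pvMapC (s.insert w (s.getD w [] ++ [c])) := by
      simp only [PySem.Dict.modify, pvMapC_getD]
      rw [← pvCount_append_one, ← pvMapC_insert]
    rw [hstep, ih (s.insert w (s.getD w [] ++ [c]))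
          (PySem.Dict.nodup_keys_insert s w _ hnd)
          (PySem.Dict.contains_insert_self s w _),
        PySem.Dict.getD_insert_self, PySem.Dict.insert_insert_self]
    simp

theorem pv_stepC (w : String) (ctx : List String) (s : PySem.Dict String (List String))
    (hnd : s.keys.Nodup) :
    ctx.foldl (fun m c => m.modify w PySem.Dict.empty
        (fun row => row.insert c (row.getD c 0 + 1))) ((pvMapC s).setdefault w PySem.Dict.empty)
      = pvMapC (s.insert w (s.getD w [] ++ ctx)) := by
  rw [pvMapC_setdefault,
      pv_stepC' w ctx _ (pv_nodup_setdefault s w hnd) (pv_contains_setdefault s w),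
      pv_getD_setdefault, pv_insert_setdefault]

-- A's guarded inner loop is a fold over the filtered, mapped window
theorem pv_inner_loop (doc : List String) (w : String) (i : Int) :
    ∀ (js : List Int) (m : PySem.Dict String (PySem.Dict String Int)),
    js.foldl (fun m j =>
        if i ≠ j then
          m.modify w PySem.Dict.empty
            (fun row => row.insert (PySem.List.pyGetD doc j "") (row.getD (PySem.List.pyGetD doc j "") 0 + 1))
        else m) m
      = ((js.filter (fun j => decide (i ≠ j))).map (fun j => PySem.List.pyGetD doc j "")).foldl
          (fun m c => m.modify w PySem.Dict.empty (fun row => row.insert c (row.getD c 0 + 1))) m := by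
  intro js
  induction js with
  | nil => intro m; rfl
  | cons a t ih =>
    intro m
    by_cases h : i = a
    · rw [List.foldl_cons, List.filter_cons, if_neg (by simpa using h : ¬ i ≠ a),
          if_neg (by simp [h] : ¬ (decide (i ≠ a) = true))]
      exact ih m
    · rw [List.foldl_cons, List.filter_cons, if_pos (by simpa using h : i ≠ a),
          if_pos (by simp [h] : decide (i ≠ a) = true), List.map_cons, List.foldl_cons]
      exact ih _

-- an empty range
theorem pv_pyRange_nil {a b : Int} (h : b ≤ a) : PySem.List.pyRange a b 1 = [] := by
  rw [PySem.List.pyRange_of_pos a b one_pos]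
  simp [not_lt.mpr h]

-- reading a natural-bounds range through the list is a slice
theorem pv_map_pyRange_slice (doc : List String) (p : Nat) :
    ∀ (q : Nat), q ≤ doc.length →
    (PySem.List.pyRange (p : Int) (q : Int) 1).map (fun j => PySem.List.pyGetD doc j "")
      = (doc.drop p).take (q - p) := by
  intro q
  induction q with
  | zero =>
    intro _
    rw [pv_pyRange_nil (by exact_mod_cast Nat.zero_le p)]
    simp
  | succ q ih =>
    intro h
    by_cases hpq : p ≤ q
    · rw [show ((q + 1 : Nat) : Int) = (q : Int) + 1 by push_cast; ring,
          PySem.List.pyRange_one_succ_right (by exact_mod_cast hpq)]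
      rw [List.map_append, ih (by omega)]
      have hq : (PySem.List.pyGetD doc (q : Int) "") = doc[q]'(by omega) := by
        rw [PySem.List.pyGetD_eq_getElem doc "" (by positivity) (by exact_mod_cast h)]
        simp
      have hsub : q + 1 - p = (q - p) + 1 := by omega
      rw [hsub, List.take_add_one, List.getElem?_drop,
          show p + (q - p) = q by omega,
          List.getElem?_eq_getElem (by omega)]
      simp [hq]
    · rw [pv_pyRange_nil (by exact_mod_cast (by omega : q + 1 ≤ p))]
      simp [show q + 1 - p = 0 by omega]

-- the window of A's inner loop, filtered and read through the list, is B's two slices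
theorem pv_window_eq (doc : List String) (cw : Int) (i : Nat) (hilt : i < doc.length) :
    ((PySem.List.pyRange (max 0 ((i : Int) - cw)) (min ((i : Int) + cw + 1) ((doc.length : Int))) 1).filter
        (fun j => decide ((i : Int) ≠ j))).map (fun j => PySem.List.pyGetD doc j "")
      = PySem.List.slice doc (some (max 0 ((i : Int) - cw))) (some (i : Int))
        ++ PySem.List.slice doc (some ((i : Int) + 1)) (some (max ((i : Int) + 1) ((i : Int) + cw + 1))) := by
  by_cases hcw : 0 ≤ cw
  · obtain ⟨c, rfl⟩ : ∃ c : Nat, cw = (c : Int) := ⟨cw.toNat, (Int.toNat_of_nonneg hcw).symm⟩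
    have hlo : max 0 ((i : Int) - (c : Int)) = ((i - c : Nat) : Int) := by omega
    have hhi : min ((i : Int) + (c : Int) + 1) ((doc.length : Int)) = ((min (i + c + 1) doc.length : Nat) : Int) := by
      push_cast; omega
    rw [hlo, hhi]
    have hsplit : PySem.List.pyRange ((i - c : Nat) : Int) ((min (i + c + 1) doc.length : Nat) : Int) 1
        = PySem.List.pyRange ((i - c : Nat) : Int) ((i : Nat) : Int) 1
          ++ PySem.List.pyRange ((i : Nat) : Int) ((min (i + c + 1) doc.length : Nat) : Int) 1 :=
      PySem.List.pyRange_one_append _ _ _ (by exact_mod_cast Nat.sub_le i c)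
        (by exact_mod_cast (by omega : i ≤ min (i + c + 1) doc.length))
    rw [hsplit,
        PySem.List.pyRange_one_cons (show ((i : Nat) : Int) < ((min (i + c + 1) doc.length : Nat) : Int) by
          exact_mod_cast (by omega : i < min (i + c + 1) doc.length))]
    rw [List.filter_append, List.filter_cons]
    have hii : (decide ((i : Int) ≠ (i : Int))) = false := by simp
    rw [hii]
    simp only [Bool.false_eq_true, if_false]
    have hfl : (PySem.List.pyRange ((i - c : Nat) : Int) ((i : Nat) : Int) 1).filter
        (fun j => decide ((i : Int) ≠ j)) = PySem.List.pyRange ((i - c : Nat) : Int) ((i : Nat) : Int) 1 := by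
      rw [List.filter_eq_self]
      intro j hj
      rw [PySem.List.mem_pyRange_one] at hj
      simp only [decide_eq_true_eq, ne_eq]
      omega
    have hfr : (PySem.List.pyRange ((i : Int) + 1) ((min (i + c + 1) doc.length : Nat) : Int) 1).filter
        (fun j => decide ((i : Int) ≠ j)) = PySem.List.pyRange ((i : Int) + 1) ((min (i + c + 1) doc.length : Nat) : Int) 1 := by
      rw [List.filter_eq_self]
      intro j hj
      rw [PySem.List.mem_pyRange_one] at hj
      simp only [decide_eq_true_eq, ne_eq]
      omega
    rw [hfl, hfr, List.map_append]
    rw [pv_map_pyRange_slice doc (i - c) i (by omega)]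
    rw [show ((i : Int) + 1) = ((i + 1 : Nat) : Int) by push_cast; ring]
    rw [pv_map_pyRange_slice doc (i + 1) (min (i + c + 1) doc.length) (by omega)]
    have hmax : max (((i + 1 : Nat) : Int)) ((i : Int) + (c : Int) + 1) = ((i + c + 1 : Nat) : Int) := by
      push_cast; omega
    rw [PySem.List.slice_natCast doc (i - c) i, hmax, PySem.List.slice_natCast doc (i + 1) (i + c + 1)]
    congr 1
    rw [List.take_eq_take_iff]
    simp only [List.length_drop]
    omega
  · -- negative window: A's range and B's two slices are all empty
    rw [not_le] at hcw
    rw [pv_pyRange_nil (by omega)]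
    simp only [List.filter_nil, List.map_nil]
    have hk : ∃ k : Nat, 1 ≤ k ∧ max 0 ((i : Int) - cw) = ((i + k : Nat) : Int) := by
      refine ⟨(-cw).toNat, by omega, by push_cast; omega⟩
    obtain ⟨k, hk1, hkeq⟩ := hk
    have hmax : max ((i : Int) + 1) ((i : Int) + cw + 1) = ((i + 1 : Nat) : Int) := by push_cast; omega
    rw [hkeq, hmax, show ((i : Int) + 1) = ((i + 1 : Nat) : Int) by push_cast; ring]
    rw [PySem.List.slice_natCast, PySem.List.slice_natCast]
    simp [show i - (i + k) = 0 by omega]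

-- one token's step: A's guarded window loop equals B's gather at that word
theorem pv_tokenStep (doc : List String) (cw : Int) (s : PySem.Dict String (List String))
    (hnd : s.keys.Nodup) (i : Nat) (hilt : i < doc.length) (w : String) :
    (PySem.List.pyRange (max 0 ((i : Int) - cw)) (min ((i : Int) + cw + 1) ((doc.length : Int))) 1).foldl
        (fun m j => if (i : Int) ≠ j then
            m.modify w PySem.Dict.empty
              (fun row => row.insert (PySem.List.pyGetD doc j "") (row.getD (PySem.List.pyGetD doc j "") 0 + 1))
          else m)
        ((pvMapC s).setdefault w PySem.Dict.empty)
      = pvMapC (s.insert w (s.getD w []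
          ++ (PySem.List.slice doc (some (max 0 ((i : Int) - cw))) (some (i : Int))
          ++ PySem.List.slice doc (some ((i : Int) + 1)) (some (max ((i : Int) + 1) ((i : Int) + cw + 1)))))) := by
  rw [pv_inner_loop doc w (i : Int) _ _]
  rw [pv_window_eq doc cw i hilt]
  rw [pv_stepC w _ s hnd]

theorem pv_docFold (doc : List String) (cw : Int) :
    ∀ (l : List (Int × String)), (∀ p ∈ l, ∃ k : Nat, k < doc.length ∧ p.1 = (k : Int)) →
    ∀ (s : PySem.Dict String (List String)), s.keys.Nodup →
    l.foldl (fun m p =>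
        let i := p.1
        let target_word := p.2
        let m := m.setdefault target_word PySem.Dict.empty
        (PySem.List.pyRange (max 0 (i - cw)) (min (i + cw + 1) ((doc.length : Int))) 1).foldl
          (fun m j =>
            if i ≠ j then
              let context_word := PySem.List.pyGetD doc j ""
              m.modify target_word PySem.Dict.empty
                (fun row => row.insert context_word (row.getD context_word 0 + 1))
            else m) m) (pvMapC s)
      = pvMapC (l.foldl (fun s p =>
          let i := p.1
          let w := p.2
          let left := PySem.List.slice doc (some (max 0 (i - cw))) (some i)
          let right := PySem.List.slice doc (some (i + 1)) (some (max (i + 1) (i + cw + 1)))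
          s.insert w (s.getD w [] ++ left ++ right)) s) := by
  intro l
  induction l with
  | nil => intro _ s _; rfl
  | cons p t ih =>
    intro hmem s hnd
    obtain ⟨k, hklt, hk1⟩ := hmem p (List.mem_cons_self)
    simp only [List.foldl_cons]
    have hstep := pv_tokenStep doc cw s hnd k hklt p.2
    rw [hk1] at *
    rw [hstep, ← List.append_assoc]
    exact ih (fun q hq => hmem q (List.mem_cons_of_mem _ hq)) _
      (PySem.Dict.nodup_keys_insert _ _ _ hnd)

theorem pv_enum_mem (doc : List String) :
    ∀ p ∈ PySem.List.enumerate doc 0, ∃ k : Nat, k < doc.length ∧ p.1 = (k : Int) := by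
  intro p hp
  rw [PySem.List.mem_enumerate_iff] at hp
  obtain ⟨k, hk, rfl⟩ := hp
  exact ⟨k, hk, by simp⟩

theorem pv_toksFold (tokens : List (List String)) (cw : Int) :
    ∀ (s : PySem.Dict String (List String)), s.keys.Nodup →
    tokens.foldl (fun m doc_tokens =>
        (PySem.List.enumerate doc_tokens).foldl (fun m p =>
          let i := p.1
          let target_word := p.2
          let m := m.setdefault target_word PySem.Dict.empty
          (PySem.List.pyRange (max 0 (i - cw)) (min (i + cw + 1) ((doc_tokens.length : Int))) 1).foldl
            (fun m j =>
              if i ≠ j then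
                let context_word := PySem.List.pyGetD doc_tokens j ""
                m.modify target_word PySem.Dict.empty
                  (fun row => row.insert context_word (row.getD context_word 0 + 1))
              else m) m) m) (pvMapC s)
      = pvMapC (tokens.foldl (fun s doc =>
          (PySem.List.enumerate doc).foldl (fun s p =>
            let i := p.1
            let w := p.2
            let left := PySem.List.slice doc (some (max 0 (i - cw))) (some i)
            let right := PySem.List.slice doc (some (i + 1)) (some (max (i + 1) (i + cw + 1)))
            s.insert w (s.getD w [] ++ left ++ right)) s) s) := by
  induction tokens with
  | nil => intro s _; rfl
  | cons doc rest ih =>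
    intro s hnd
    simp only [List.foldl_cons]
    rw [pv_docFold doc cw (PySem.List.enumerate doc 0) (pv_enum_mem doc) s hnd]
    exact ih _ (PySem.Dict.nodup_keys_foldl_insert_key (PySem.List.enumerate doc 0)
      (fun p => p.2) _ s hnd)

-- ===== VERDICT (by name: the statement is the Claim_ definition above) =====
theorem create_term_context_matrix_spec : Claim_equal_create_term_context_matrix := by
  intro tokens cw _
  show create_term_context_matrix tokens cw = create_term_context_matrix_alt tokens cw
  unfold create_term_context_matrix create_term_context_matrix_alt
  rw [show (PySem.Dict.empty : PySem.Dict String (PySem.Dict String Int)) = pvMapC PySem.Dict.empty from rfl,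
      pv_toksFold tokens cw PySem.Dict.empty (by simp [PySem.Dict.keys, PySem.Dict.empty])]
  simp [pvMapC, List.map_map, Function.comp_def]
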